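-- pv_equiv track=rewrite | github.com/yun-li-ai/cosmos-reason2 | scripts/critique_generated_video.py | extract_assistant_markdown
-- ===== SOURCE A (Python) =====
-- _INFERENCE_SEP_LINE = "-" * 20
--
-- def extract_assistant_markdown(captured_stdout: str) -> tuple[str, bool]:
--     """Parse offline inference stdout; return (body, True) if an Assistant block was found."""
--     lines = captured_stdout.splitlines()
--     for i, line in enumerate(lines):
--         if line.strip() != "Assistant:":
--             continue
--         if i == 0 or lines[i - 1].strip() != _INFERENCE_SEP_LINE:
--             continue
--         j = i + 1
--         out: list[str] = []
--         while j < len(lines):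
--             if lines[j].strip() == _INFERENCE_SEP_LINE:
--                 break
--             ln = lines[j]
--             if ln.startswith("  "):
--                 out.append(ln[2:])
--             else:
--                 out.append(ln)
--             j += 1
--         return "\n".join(out).strip(), True
--     return captured_stdout.strip(), False
-- ===== SOURCE B (Python) =====
-- _INFERENCE_SEP_LINE = "-" * 20
--
-- def extract_assistant_markdown(captured_stdout: str) -> tuple[str, bool]:
--     """Single flat pass over splitlines(): a small state machine instead of an indexed scan with an inner loop."""
--     prev_was_sep = False
--     collecting = False
--     out: list[str] = []
--     for line in captured_stdout.splitlines():
--         if collecting: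
--             if line.strip() == _INFERENCE_SEP_LINE:
--                 return "\n".join(out).strip(), True
--             out.append(line[2:] if line.startswith("  ") else line)
--         elif prev_was_sep and line.strip() == "Assistant:":
--             collecting = True
--         prev_was_sep = line.strip() == _INFERENCE_SEP_LINE
--     if collecting:
--         return "\n".join(out).strip(), True
--     return captured_stdout.strip(), False
-- ===== Notes on version B (the rewrite author's own statement) =====
-- stated objective: alternative
-- what changed: Replaced the indexed outer scan (enumerate with lines[i-1] lookup) plus separate inner collection while-loop by a single flat pass over splitlines() maintaining prev_was_sep / collecting flags and an out list.
import Mathlib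
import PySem

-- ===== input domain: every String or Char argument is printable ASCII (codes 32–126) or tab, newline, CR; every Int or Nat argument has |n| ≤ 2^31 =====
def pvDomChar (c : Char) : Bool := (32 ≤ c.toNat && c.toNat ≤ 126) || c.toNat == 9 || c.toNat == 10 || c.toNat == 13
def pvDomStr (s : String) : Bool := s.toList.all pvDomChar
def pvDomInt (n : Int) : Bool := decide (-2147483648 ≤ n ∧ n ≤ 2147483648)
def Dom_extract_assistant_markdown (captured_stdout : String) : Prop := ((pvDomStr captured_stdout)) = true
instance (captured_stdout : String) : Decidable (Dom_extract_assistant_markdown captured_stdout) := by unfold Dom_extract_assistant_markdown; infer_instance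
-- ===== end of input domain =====

-- B replaces A's indexed scan with an inner collection loop by a single flat
-- state-machine pass over the lines (objective: alternative decomposition, same cost).

def pvSep : String := "--------------------"

-- ===== PORT A =====
-- A's inner while loop: collect lines until a separator line (or the end).
def pvCollectA : List String → List String
  | [] => []
  | ln :: rest =>
    if PySem.Str.strip ln = pvSep then []
    else (if PySem.Str.startswith ln "  " then PySem.Str.slice ln (some 2) none else ln)
          :: pvCollectA rest

-- A's outer for loop: i==0 is prev = none; lines[i-1] is prev = some p.
def pvScanA : List String → Option String → Option String
  | [], _ => none
  | ln :: rest, prev =>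
    if PySem.Str.strip ln ≠ "Assistant:" then pvScanA rest (some ln)
    else
      match prev with
      | none => pvScanA rest (some ln)
      | some p =>
        if PySem.Str.strip p ≠ pvSep then pvScanA rest (some ln)
        else some (PySem.Str.strip (PySem.Str.join "\n" (pvCollectA rest)))

def extract_assistant_markdown (captured_stdout : String) : String × Bool :=
  match pvScanA (PySem.Str.splitlines captured_stdout) none with
  | some body => (body, true)
  | none => (PySem.Str.strip captured_stdout, false)

-- ===== PORT B =====
-- B's single for loop with state (prev_was_sep, collecting, out).
def pvLoopB (s : String) : List String → Bool → Bool → List String → String × Bool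
  | [], _, collecting, out =>
    if collecting then (PySem.Str.strip (PySem.Str.join "\n" out), true)
    else (PySem.Str.strip s, false)
  | line :: rest, prevSep, collecting, out =>
    if collecting then
      if PySem.Str.strip line = pvSep then (PySem.Str.strip (PySem.Str.join "\n" out), true)
      else pvLoopB s rest (PySem.Str.strip line == pvSep) true
             (out ++ [if PySem.Str.startswith line "  " then PySem.Str.slice line (some 2) none else line])
    else if prevSep ∧ PySem.Str.strip line = "Assistant:" then
      pvLoopB s rest (PySem.Str.strip line == pvSep) true out
    else pvLoopB s rest (PySem.Str.strip line == pvSep) false out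

def extract_assistant_markdown_alt (captured_stdout : String) : String × Bool :=
  pvLoopB captured_stdout (PySem.Str.splitlines captured_stdout) false false []

-- ===== PRECONDITION & SPEC =====
def Spec_extract_assistant_markdown (captured_stdout : String) (out : String × Bool) : Prop := out = extract_assistant_markdown_alt captured_stdout
instance (captured_stdout : String) (out : String × Bool) : Decidable (Spec_extract_assistant_markdown captured_stdout out) := by unfold Spec_extract_assistant_markdown; infer_instance

-- ===== CLAIM (what is proved, stated in full; the proofs are below) =====
def Claim_equal_extract_assistant_markdown : Prop := ∀ (captured_stdout : String), Dom_extract_assistant_markdown captured_stdout → Spec_extract_assistant_markdown captured_stdout (extract_assistant_markdown captured_stdout)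

-- ===== LEMMAS AND PROOFS =====

-- Once B is collecting, it produces exactly A's inner loop's lines, appended to out.
theorem pvLoopB_collecting (s : String) (rest : List String) (p : Bool) (out : List String) :
    pvLoopB s rest p true out
      = (PySem.Str.strip (PySem.Str.join "\n" (out ++ pvCollectA rest)), true) := by
  induction rest generalizing p out with
  | nil => simp [pvLoopB, pvCollectA]
  | cons ln rest ih =>
    by_cases h : PySem.Str.strip ln = pvSep
    · simp [pvLoopB, pvCollectA, h]
    · simp only [pvLoopB, pvCollectA, if_neg h, if_pos, ih]
      simp [List.append_assoc]

def pvPrevFlag : Option String → Bool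
  | none => false
  | some p => PySem.Str.strip p == pvSep

-- B's flat scan agrees with A's outer loop.
theorem pvLoopB_scan (s : String) (lines : List String) (prev : Option String) :
    pvLoopB s lines (pvPrevFlag prev) false []
      = (match pvScanA lines prev with
         | some body => (body, true)
         | none => (PySem.Str.strip s, false)) := by
  induction lines generalizing prev with
  | nil => simp [pvLoopB, pvScanA]
  | cons ln rest ih =>
    cases prev with
    | none =>
      simp only [pvLoopB, pvScanA, pvPrevFlag]
      rw [if_neg (by simp : ¬ (false = true)),
          if_neg (by simp : ¬ ((false = true) ∧ PySem.Str.strip ln = "Assistant:"))]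
      by_cases hhd : PySem.Str.strip ln = "Assistant:"
      · rw [if_neg (not_not_intro hhd)]
        exact ih (some ln)
      · rw [if_pos hhd]
        exact ih (some ln)
    | some p =>
      simp only [pvLoopB, pvScanA, pvPrevFlag]
      rw [if_neg (by simp : ¬ (false = true))]
      by_cases hhd : PySem.Str.strip ln = "Assistant:"
      · rw [if_neg (not_not_intro hhd)]
        by_cases hp : PySem.Str.strip p = pvSep
        · rw [if_pos ⟨by simp [hp], hhd⟩, if_neg (not_not_intro hp), pvLoopB_collecting]
          simp
        · rw [if_neg (by simp [hp]), if_pos hp]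
          exact ih (some ln)
      · rw [if_pos hhd, if_neg (by simp [hhd])]
        exact ih (some ln)

-- ===== VERDICT (by name: the statement is the Claim_ definition above) =====
theorem extract_assistant_markdown_spec : Claim_equal_extract_assistant_markdown := by
  intro s _
  unfold Spec_extract_assistant_markdown extract_assistant_markdown extract_assistant_markdown_alt
  exact (pvLoopB_scan s (PySem.Str.splitlines s) none).symm
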